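-- pv_equiv track=rewrite | github.com/DMustache/Projects | Python/ЕГЭ 17.py | delimiters
-- ===== SOURCE A (Python) =====
-- def delimiters(num):
--     tmp = 0
--     for i in range(num -1, 1, -1):
--         if num % i == 0:
--             tmp += 1
--
--             if tmp == 17:
--                 return True
--
--     if tmp == 17:
--         return True
--     else:
--         return False
-- ===== SOURCE B (Python) =====
-- def delimiters(num):
--     if num < 2:
--         return False
--     cnt = 0
--     i = 1
--     while i * i <= num:
--         if num % i == 0:
--             cnt += 1 if i * i == num else 2
--         i += 1
--     return cnt - 2 >= 17
-- ===== Notes on version B (the rewrite author's own statement) =====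
-- stated objective: faster
-- what changed: B counts all divisors of num via factor pairs up to sqrt(num) in one O(sqrt(num)) loop and subtracts the two trivial divisors, instead of A's O(num) downward scan over every candidate in [2, num-1] with an early exit at 17.
import Mathlib
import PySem

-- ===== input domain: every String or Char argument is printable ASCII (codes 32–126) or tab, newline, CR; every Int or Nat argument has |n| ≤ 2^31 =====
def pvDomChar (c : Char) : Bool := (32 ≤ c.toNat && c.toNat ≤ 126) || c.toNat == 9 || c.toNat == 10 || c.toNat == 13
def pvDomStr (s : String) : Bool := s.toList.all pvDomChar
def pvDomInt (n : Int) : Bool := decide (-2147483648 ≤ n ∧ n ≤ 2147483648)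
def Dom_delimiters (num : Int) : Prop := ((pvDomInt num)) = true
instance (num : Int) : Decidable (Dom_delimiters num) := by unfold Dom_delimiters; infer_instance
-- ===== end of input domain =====

-- B replaces A's O(num) downward scan over [2, num-1] by an O(sqrt(num)) factor-pair count
-- of all divisors, subtracting the two trivial ones (objective: faster).

-- ===== PORT A =====
-- the for-loop of A over range(num-1, 1, -1) with early return when tmp hits 17
def delimitersLoop (num : Int) : List Int → Int → Bool
  | [], tmp => tmp == 17
  | i :: rest, tmp =>
    if PySem.Int.mod num i == 0 then
      if tmp + 1 == 17 then true
      else delimitersLoop num rest (tmp + 1)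
    else delimitersLoop num rest tmp

def delimiters (num : Int) : Bool :=
  delimitersLoop num (PySem.List.pyRange (num - 1) 1 (-1)) 0

-- ===== PORT B =====
-- the while-loop of B: i from 1 while i*i ≤ num, counting divisor pairs
def altLoop (num : Int) (i : Int) (cnt : Int) : Int :=
  if _h : i * i ≤ num then
    altLoop num (i + 1)
      (if PySem.Int.mod num i == 0 then cnt + (if i * i == num then 1 else 2) else cnt)
  else cnt
termination_by (num + 1 - i).toNat
decreasing_by
  have hle : i ≤ num := by rcases Int.lt_or_le 0 i with h0 | h0 <;> nlinarith [sq_nonneg i]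
  omega

def delimiters_alt (num : Int) : Bool :=
  if num < 2 then false
  else decide (17 ≤ altLoop num 1 0 - 2)

-- ===== PRECONDITION & SPEC =====
def Spec_delimiters (num : Int) (out : Bool) : Prop := out = delimiters_alt num
instance (num : Int) (out : Bool) : Decidable (Spec_delimiters num out) := by unfold Spec_delimiters; infer_instance

-- ===== CLAIM (what is proved, stated in full; the proofs are below) =====
def Claim_equal_delimiters : Prop := ∀ (num : Int), Dom_delimiters num → Spec_delimiters num (delimiters num)

-- ===== LEMMAS AND PROOFS =====

theorem Icc_int_insert_top (a b : Int) (h : a ≤ b + 1) :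
    Finset.Icc a (b + 1) = insert (b + 1) (Finset.Icc a b) := by
  ext x; simp; omega

-- A's loop is a pure count with a cap at 17
theorem delimitersLoop_eq (num : Int) (l : List Int) (tmp : Int) (h : tmp < 17) :
    delimitersLoop num l tmp
      = decide (17 ≤ tmp + (l.countP (fun i => PySem.Int.mod num i == 0))) := by
  induction l generalizing tmp with
  | nil =>
    simp only [delimitersLoop, List.countP_nil, Nat.cast_zero, add_zero]
    rw [show (tmp == 17) = false from by simpa using (by omega : ¬ tmp = 17),
        decide_eq_false (by omega : ¬ (17:Int) ≤ tmp)]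
  | cons i rest ih =>
    have hc : ((0:Int) ≤ (rest.countP (fun i => PySem.Int.mod num i == 0) : Int)) := by positivity
    by_cases hd : PySem.Int.mod num i = 0
    · have hdb : (PySem.Int.mod num i == 0) = true := by simp [hd]
      by_cases h17 : tmp + 1 = 17
      · have h17b : (tmp + 1 == 17) = true := by simp [h17]
        simp only [delimitersLoop, List.countP_cons, hdb, h17b, if_true]
        exact (decide_eq_true (by push_cast; omega)).symm
      · have h17b : (tmp + 1 == 17) = false := by simp [h17]
        simp only [delimitersLoop, List.countP_cons, hdb, h17b, if_true, if_false,
          Bool.false_eq_true]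
        rw [ih (tmp + 1) (by omega)]
        simp only [decide_eq_decide]
        push_cast
        omega
    · have hdb : (PySem.Int.mod num i == 0) = false := by simp [hd]
      simp only [delimitersLoop, List.countP_cons, hdb, if_false, Bool.false_eq_true,
        add_zero]
      exact ih tmp h

theorem countP_pyRange_neg_one (num m : Int) (hm : 1 ≤ m) :
    ((PySem.List.pyRange m 1 (-1)).countP (fun i => PySem.Int.mod num i == 0) : Int)
      = ((Finset.Icc 2 m).filter (fun d => d ∣ num)).card := by
  induction m, hm using Int.le_induction with
  | base =>
    rw [PySem.List.pyRange_neg_one_eq_nil (by omega)]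
    simp
  | succ m hm ih =>
    rw [PySem.List.pyRange_neg_one_cons (by omega), show m + 1 - 1 = m from by ring,
        List.countP_cons, Icc_int_insert_top 2 m (by omega), Finset.filter_insert]
    by_cases hd : (m+1) ∣ num
    · have hnotmem : (m+1) ∉ (Finset.Icc 2 m).filter (fun d => d ∣ num) := by
        intro hmem
        simp only [Finset.mem_filter, Finset.mem_Icc] at hmem
        obtain ⟨⟨hx1, hx2⟩, -⟩ := hmem
        omega
      rw [if_pos hd, Finset.card_insert_of_notMem hnotmem,
          show (PySem.Int.mod num (m+1) == 0) = true from by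
            simp [PySem.Int.mod_eq_zero_iff_dvd, hd]]
      simp only [if_true]
      push_cast at ih ⊢
      omega
    · rw [if_neg hd,
          show (PySem.Int.mod num (m+1) == 0) = false from by
            simp [PySem.Int.mod_eq_zero_iff_dvd, hd]]
      simp only [Bool.false_eq_true, if_false, add_zero]
      exact ih

-- characterisation of A: true iff num has at least 17 divisors in [2, num-1]
theorem delimiters_eq_card (num : Int) :
    delimiters num
      = decide (17 ≤ (((Finset.Icc 2 (num - 1)).filter (fun d => d ∣ num)).card : Int)) := by
  unfold delimiters
  rw [delimitersLoop_eq num _ 0 (by omega)]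
  rcases Int.lt_or_le (num - 1) 1 with h | h
  · rw [PySem.List.pyRange_neg_one_eq_nil (by omega)]
    have he : (Finset.Icc 2 (num-1)).filter (fun d => d ∣ num) = ∅ := by
      apply Finset.filter_false_of_mem
      intro d hd
      simp at hd
      omega
    simp [he]
  · simp only [decide_eq_decide]
    rw [← countP_pyRange_neg_one num (num - 1) h]
    omega

-- B's loop sums pair weights over the small divisors from i upward
theorem altLoop_eq (num : Int) (hnum : 1 ≤ num) (i : Int) (hi : 1 ≤ i) (cnt : Int) :
    altLoop num i cnt
      = cnt + ((Finset.Icc i num).filter (fun j => j * j ≤ num ∧ j ∣ num)).sum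
          (fun j => if j * j = num then 1 else 2) := by
  rw [altLoop]
  by_cases h : i * i ≤ num
  · rw [dif_pos h, altLoop_eq num hnum (i+1) (by omega)]
    have hilen : i ≤ num := by nlinarith
    have hsplit : (Finset.Icc i num).filter (fun j => j * j ≤ num ∧ j ∣ num)
        = if i * i ≤ num ∧ i ∣ num then
            insert i ((Finset.Icc (i+1) num).filter (fun j => j * j ≤ num ∧ j ∣ num))
          else (Finset.Icc (i+1) num).filter (fun j => j * j ≤ num ∧ j ∣ num) := by
      rw [show Finset.Icc i num = insert i (Finset.Icc (i+1) num) from by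
        ext x; simp; omega]
      rw [Finset.filter_insert]
    by_cases hd : i ∣ num
    · have hmem : i ∉ (Finset.Icc (i+1) num).filter (fun j => j * j ≤ num ∧ j ∣ num) := by
        intro hmem
        simp only [Finset.mem_filter, Finset.mem_Icc] at hmem
        obtain ⟨⟨h1, h2⟩, -⟩ := hmem
        omega
      rw [show (PySem.Int.mod num i == 0) = true from by
            simp [PySem.Int.mod_eq_zero_iff_dvd, hd],
          hsplit, if_pos (show i * i ≤ num ∧ i ∣ num from ⟨h, hd⟩),
          Finset.sum_insert hmem]
      simp only [if_true]
      by_cases hsq : i * i = num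
      · rw [show (i * i == num) = true from by simp [hsq], if_pos hsq]
        simp only [if_true]
        ring
      · rw [show (i * i == num) = false from by simp [hsq], if_neg hsq]
        simp only [Bool.false_eq_true, if_false]
        ring
    · rw [show (PySem.Int.mod num i == 0) = false from by
            simp [PySem.Int.mod_eq_zero_iff_dvd, hd],
          hsplit, if_neg (show ¬ (i * i ≤ num ∧ i ∣ num) from fun hh => hd hh.2)]
      simp only [Bool.false_eq_true, if_false]
  · rw [dif_neg h]
    have he : (Finset.Icc i num).filter (fun j => j * j ≤ num ∧ j ∣ num) = ∅ := by
      apply Finset.filter_false_of_mem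
      intro j hj
      simp at hj
      rintro ⟨hjj, -⟩
      nlinarith [hj.1, hj.2]
    simp [he]
termination_by (num + 1 - i).toNat
decreasing_by
  have hle : i ≤ num := by nlinarith
  omega

-- the large divisors biject with the strictly-small ones via d ↦ num / d
theorem card_large_divs (num : Int) (hnum : 1 ≤ num) :
    ((Finset.Icc 1 num).filter (fun j => num < j * j ∧ j ∣ num)).card
      = ((Finset.Icc 1 num).filter (fun j => j * j < num ∧ j ∣ num)).card := by
  apply Finset.card_bij' (fun d _ => num / d) (fun d _ => num / d)
  · intro d hd
    simp only [Finset.mem_filter, Finset.mem_Icc] at hd ⊢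
    obtain ⟨⟨h1, h2⟩, h3, e, he⟩ := hd
    have hdpos : 0 < d := by omega
    have hepos : 0 < e := by nlinarith
    have hdiv : num / d = e := by rw [he]; exact Int.mul_ediv_cancel_left e (by omega)
    have hed : e < d := lt_of_mul_lt_mul_left (he ▸ h3) (by omega)
    rw [hdiv]
    refine ⟨⟨by omega, by nlinarith⟩, ?_, ⟨d, by rw [he]; ring⟩⟩
    calc e * e < d * e := mul_lt_mul_of_pos_right hed hepos
      _ = num := he.symm
  · intro d hd
    simp only [Finset.mem_filter, Finset.mem_Icc] at hd ⊢
    obtain ⟨⟨h1, h2⟩, h3, e, he⟩ := hd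
    have hdpos : 0 < d := by omega
    have hepos : 0 < e := by nlinarith
    have hdiv : num / d = e := by rw [he]; exact Int.mul_ediv_cancel_left e (by omega)
    have hde : d < e := lt_of_mul_lt_mul_left (by calc d * d < num := h3
                                                    _ = d * e := he) (by omega)
    rw [hdiv]
    refine ⟨⟨by omega, by nlinarith⟩, ?_, ⟨d, by rw [he]; ring⟩⟩
    calc num = d * e := he
      _ < e * e := by nlinarith
  · intro d hd
    simp only [Finset.mem_filter, Finset.mem_Icc] at hd
    obtain ⟨⟨h1, h2⟩, h3, e, he⟩ := hd
    have hdpos : 0 < d := by omega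
    have hepos : 0 < e := by nlinarith
    have hdiv : num / d = e := by rw [he]; exact Int.mul_ediv_cancel_left e (by omega)
    rw [hdiv, he]
    exact Int.mul_ediv_cancel d (by omega)
  · intro d hd
    simp only [Finset.mem_filter, Finset.mem_Icc] at hd
    obtain ⟨⟨h1, h2⟩, h3, e, he⟩ := hd
    have hdpos : 0 < d := by omega
    have hepos : 0 < e := by nlinarith
    have hdiv : num / d = e := by rw [he]; exact Int.mul_ediv_cancel_left e (by omega)
    rw [hdiv, he]
    exact Int.mul_ediv_cancel d (by omega)

-- the pair-weighted sum over the small divisors counts ALL divisors in [1, num]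
theorem pair_sum_eq_card (num : Int) (hnum : 1 ≤ num) :
    ((Finset.Icc 1 num).filter (fun j => j * j ≤ num ∧ j ∣ num)).sum
        (fun j => if j * j = num then (1:Int) else 2)
      = (((Finset.Icc 1 num).filter (fun d => d ∣ num)).card : Int) := by
  set S := (Finset.Icc 1 num).filter (fun j => j * j ≤ num ∧ j ∣ num) with hS
  set S' := (Finset.Icc 1 num).filter (fun j => j * j < num ∧ j ∣ num) with hS'
  set L := (Finset.Icc 1 num).filter (fun j => num < j * j ∧ j ∣ num) with hL
  have hSeq : S.filter (fun j => ¬ j * j = num) = S' := by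
    ext j
    simp only [hS, hS', Finset.mem_filter]
    constructor
    · rintro ⟨⟨ha, hb, hc⟩, hne⟩; exact ⟨ha, lt_of_le_of_ne hb hne, hc⟩
    · rintro ⟨ha, hb, hc⟩; exact ⟨⟨ha, le_of_lt hb, hc⟩, ne_of_lt hb⟩
  have hsum : S.sum (fun j => if j * j = num then (1:Int) else 2) = S.card + S'.card := by
    rw [← Finset.sum_filter_add_sum_filter_not S (fun j => j * j = num)]
    have h1 : (S.filter (fun j => j * j = num)).sum (fun j => if j * j = num then (1:Int) else 2)
        = (S.filter (fun j => j * j = num)).card := by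
      rw [Finset.sum_congr rfl (fun j hj => by
        simp only [Finset.mem_filter] at hj; rw [if_pos hj.2]), Finset.sum_const]
      simp
    have h2 : (S.filter (fun j => ¬ j * j = num)).sum (fun j => if j * j = num then (1:Int) else 2)
        = 2 * (S.filter (fun j => ¬ j * j = num)).card := by
      rw [Finset.sum_congr rfl (fun j hj => by
        simp only [Finset.mem_filter] at hj; rw [if_neg hj.2]), Finset.sum_const]
      ring
    have h3 : (S.filter (fun j => j * j = num)).card + S'.card = S.card := by
      rw [← Finset.card_filter_add_card_filter_not (s := S) (p := fun j => j * j = num), hSeq]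
    rw [h1, h2, hSeq]
    omega
  have hdisj : Disjoint S L := by
    rw [Finset.disjoint_filter]
    intro j _ hj hj'
    exact absurd hj'.1 (not_lt.mpr hj.1)
  have hunion : S ∪ L = (Finset.Icc 1 num).filter (fun d => d ∣ num) := by
    ext j
    simp only [hS, hL, Finset.mem_union, Finset.mem_filter, Finset.mem_Icc]
    constructor
    · rintro (⟨h1, _, h3⟩ | ⟨h1, _, h3⟩) <;> exact ⟨h1, h3⟩
    · rintro ⟨h1, h3⟩
      rcases Int.lt_or_le num (j * j) with h | h
      · exact Or.inr ⟨h1, h, h3⟩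
      · exact Or.inl ⟨h1, h, h3⟩
  calc S.sum (fun j => if j * j = num then (1:Int) else 2)
      = S.card + S'.card := hsum
    _ = S.card + L.card := by rw [← card_large_divs num hnum]
    _ = (((S ∪ L).card : Nat) : Int) := by rw [Finset.card_union_of_disjoint hdisj]; push_cast; ring
    _ = _ := by rw [hunion]

-- divisors in [2, num-1] are all divisors minus the trivial 1 and num
theorem divs_mid (num : Int) (hnum : 2 ≤ num) :
    (((Finset.Icc 1 num).filter (fun d => d ∣ num)).card : Int)
      = ((Finset.Icc 2 (num - 1)).filter (fun d => d ∣ num)).card + 2 := by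
  have h1 : (Finset.Icc 1 num).filter (fun d => d ∣ num)
      = insert 1 (insert num ((Finset.Icc 2 (num - 1)).filter (fun d => d ∣ num))) := by
    ext j
    simp only [Finset.mem_insert, Finset.mem_filter, Finset.mem_Icc]
    constructor
    · rintro ⟨⟨ha, hb⟩, hc⟩
      rcases eq_or_lt_of_le ha with h | h
      · exact Or.inl h.symm
      rcases eq_or_lt_of_le hb with h' | h'
      · exact Or.inr (Or.inl h')
      · exact Or.inr (Or.inr ⟨⟨by omega, by omega⟩, hc⟩)
    · rintro (rfl | rfl | ⟨⟨ha, hb⟩, hc⟩)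
      · exact ⟨⟨le_refl _, by omega⟩, one_dvd _⟩
      · exact ⟨⟨by omega, le_refl _⟩, dvd_refl _⟩
      · exact ⟨⟨by omega, by omega⟩, hc⟩
  rw [h1, Finset.card_insert_of_notMem, Finset.card_insert_of_notMem]
  · push_cast; ring
  · intro hmem
    simp only [Finset.mem_filter, Finset.mem_Icc] at hmem
    obtain ⟨⟨hx, hy⟩, -⟩ := hmem
    omega
  · intro hmem
    simp only [Finset.mem_insert, Finset.mem_filter, Finset.mem_Icc] at hmem
    rcases hmem with h | ⟨⟨hx, hy⟩, -⟩ <;> omega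

-- ===== VERDICT (by name: the statement is the Claim_ definition above) =====
theorem delimiters_spec : Claim_equal_delimiters := by
  intro num _
  unfold Spec_delimiters delimiters_alt
  rw [delimiters_eq_card]
  split_ifs with h2
  · have he : (Finset.Icc 2 (num - 1)).filter (fun d => d ∣ num) = ∅ := by
      apply Finset.filter_false_of_mem
      intro d hd
      simp at hd
      omega
    simp [he]
  · have h2' : 2 ≤ num := by omega
    rw [altLoop_eq num (by omega) 1 (le_refl _) 0, pair_sum_eq_card num (by omega)]
    have := divs_mid num h2'
    simp only [decide_eq_decide]
    omega
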